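-- pv_equiv track=rewrite | github.com/YILING0013/AI_NovelGenerator | prompts/constants.py | get_cultivation_constraint
-- ===== SOURCE A (Python) =====
-- CULTIVATION_PROGRESS_MAP = {
--     # 第一卷：系统觉醒篇 (1-80章) - 练气到筑基
--     (1, 20): ("练气初期", "练气后期"),
--     (21, 50): ("练气后期", "筑基初期"),
--     (51, 80): ("筑基初期", "筑基中期"),
--
--     # 第二卷：宗门争霸篇 (81-160章) - 筑基到金丹
--     (81, 120): ("筑基中期", "筑基后期"),
--     (121, 160): ("筑基圆满", "金丹初期"),
--
--     # 第三卷：复仇之路篇 (161-240章) - 金丹到元婴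
--     (161, 200): ("金丹初期", "金丹中期"),
--     (201, 240): ("金丹后期", "元婴初期"),
--
--     # 第四卷：统一天下篇 (241-320章) - 元婴到化神
--     (241, 280): ("元婴初期", "元婴中期"),
--     (281, 320): ("元婴后期", "化神初期"),
--
--     # 第五卷：飞升成仙篇 (321-400章) - 化神到渡劫飞升
--     (321, 360): ("化神初期", "化神后期"),
--     (361, 388): ("化神圆满", "渡劫期"),
--     (389, 400): ("渡劫期", "飞升成仙"),
-- }
--
-- def get_cultivation_constraint(chapter_num: int) -> dict:
--     """根据章节号返回修为约束"""
--     for (start, end), (current, max_realm) in CULTIVATION_PROGRESS_MAP.items():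
--         if start <= chapter_num <= end:
--             return {
--                 "current_realm": current,
--                 "max_realm": max_realm,
--                 "constraint_text": f"【修为锁定】主角当前境界应在【{current}】附近，本章最多可突破至【{max_realm}】，禁止跳级！"
--             }
--     return {"current_realm": "自由", "max_realm": "自由", "constraint_text": ""}
-- ===== SOURCE B (Python) =====
-- import bisect
--
-- _STARTS = [1, 21, 51, 81, 121, 161, 201, 241, 281, 321, 361, 389]
-- _VALS = [
--     ("练气初期", "练气后期"),
--     ("练气后期", "筑基初期"),
--     ("筑基初期", "筑基中期"),
--     ("筑基中期", "筑基后期"),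
--     ("筑基圆满", "金丹初期"),
--     ("金丹初期", "金丹中期"),
--     ("金丹后期", "元婴初期"),
--     ("元婴初期", "元婴中期"),
--     ("元婴后期", "化神初期"),
--     ("化神初期", "化神后期"),
--     ("化神圆满", "渡劫期"),
--     ("渡劫期", "飞升成仙"),
-- ]
--
-- def get_cultivation_constraint(chapter_num: int) -> dict:
--     if chapter_num < 1 or chapter_num > 400:
--         return {"current_realm": "自由", "max_realm": "自由", "constraint_text": ""}
--     i = bisect.bisect_right(_STARTS, chapter_num) - 1
--     current, max_realm = _VALS[i]
--     return {
--         "current_realm": current,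
--         "max_realm": max_realm,
--         "constraint_text": f"【修为锁定】主角当前境界应在【{current}】附近，本章最多可突破至【{max_realm}】，禁止跳级！"
--     }
-- ===== Notes on version B (the rewrite author's own statement) =====
-- stated objective: idiomatic
-- what changed: Replaced the linear scan over the interval dict by a precomputed sorted start-point table queried with bisect.bisect_right (binary search) after a single range check.
import Mathlib
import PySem

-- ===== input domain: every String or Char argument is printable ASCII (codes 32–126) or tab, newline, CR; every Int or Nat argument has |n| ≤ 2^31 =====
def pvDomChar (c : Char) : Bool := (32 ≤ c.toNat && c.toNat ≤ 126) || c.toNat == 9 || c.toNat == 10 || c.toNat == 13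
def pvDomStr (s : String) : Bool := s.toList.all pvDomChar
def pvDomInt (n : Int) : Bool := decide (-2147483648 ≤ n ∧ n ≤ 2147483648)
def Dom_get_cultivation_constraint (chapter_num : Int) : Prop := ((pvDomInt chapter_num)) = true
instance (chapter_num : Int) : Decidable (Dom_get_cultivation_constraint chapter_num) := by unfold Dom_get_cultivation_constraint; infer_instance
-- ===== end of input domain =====

-- B replaces A's linear scan over the interval map by a binary search (bisect_right) into a
-- precomputed table of interval starts; same return value everywhere (objective: idiomatic/alternative).

-- ===== PORT A =====
-- the module-level dict CULTIVATION_PROGRESS_MAP, in insertion order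
def pvCMap : List ((Int × Int) × (String × String)) :=
  [ ((1, 20), ("练气初期", "练气后期"))
  , ((21, 50), ("练气后期", "筑基初期"))
  , ((51, 80), ("筑基初期", "筑基中期"))
  , ((81, 120), ("筑基中期", "筑基后期"))
  , ((121, 160), ("筑基圆满", "金丹初期"))
  , ((161, 200), ("金丹初期", "金丹中期"))
  , ((201, 240), ("金丹后期", "元婴初期"))
  , ((241, 280), ("元婴初期", "元婴中期"))
  , ((281, 320), ("元婴后期", "化神初期"))
  , ((321, 360), ("化神初期", "化神后期"))
  , ((361, 388), ("化神圆满", "渡劫期"))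
  , ((389, 400), ("渡劫期", "飞升成仙")) ]

-- the for-loop over .items(): return on the first interval containing chapter_num
def pvFindA : List ((Int × Int) × (String × String)) → Int → List (String × String)
  | [], _ => [("current_realm", "自由"), ("max_realm", "自由"), ("constraint_text", "")]
  | ((s, e), (c, m)) :: rest, n =>
      if s ≤ n ∧ n ≤ e then
        [ ("current_realm", c), ("max_realm", m)
        , ("constraint_text", "【修为锁定】主角当前境界应在【" ++ c ++ "】附近，本章最多可突破至【" ++ m ++ "】，禁止跳级！") ]
      else pvFindA rest n

def get_cultivation_constraint (chapter_num : Int) : List (String × String) :=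
  pvFindA pvCMap chapter_num

-- ===== PORT B =====
def pvStarts : List Int := [1, 21, 51, 81, 121, 161, 201, 241, 281, 321, 361, 389]

def pvVals : List (String × String) :=
  [ ("练气初期", "练气后期"), ("练气后期", "筑基初期"), ("筑基初期", "筑基中期")
  , ("筑基中期", "筑基后期"), ("筑基圆满", "金丹初期"), ("金丹初期", "金丹中期")
  , ("金丹后期", "元婴初期"), ("元婴初期", "元婴中期"), ("元婴后期", "化神初期")
  , ("化神初期", "化神后期"), ("化神圆满", "渡劫期"), ("渡劫期", "飞升成仙") ]

-- bisect.bisect_right's 'while lo < hi' halving loop; fuel = a.length bounds the iteration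
-- count (hi - lo shrinks every step), so the port is exact on every call made here
def pvBisectRightAux (a : List Int) (x : Int) : Nat → Nat → Nat → Nat
  | 0, lo, _ => lo
  | fuel + 1, lo, hi =>
    if lo < hi then
      let mid := (lo + hi) / 2
      if x < a.getD mid 0 then pvBisectRightAux a x fuel lo mid
      else pvBisectRightAux a x fuel (mid + 1) hi
    else lo

def pvBisectRight (a : List Int) (x : Int) (lo hi : Nat) : Nat :=
  pvBisectRightAux a x a.length lo hi

def get_cultivation_constraint_alt (chapter_num : Int) : List (String × String) :=
  if chapter_num < 1 ∨ chapter_num > 400 then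
    [("current_realm", "自由"), ("max_realm", "自由"), ("constraint_text", "")]
  else
    let i := pvBisectRight pvStarts chapter_num 0 pvStarts.length - 1
    let cm := pvVals.getD i ("", "")
    [ ("current_realm", cm.1), ("max_realm", cm.2)
    , ("constraint_text", "【修为锁定】主角当前境界应在【" ++ cm.1 ++ "】附近，本章最多可突破至【" ++ cm.2 ++ "】，禁止跳级！") ]

-- ===== PRECONDITION & SPEC =====
def Spec_get_cultivation_constraint (chapter_num : Int) (out : List (String × String)) : Prop := out = get_cultivation_constraint_alt chapter_num
instance (chapter_num : Int) (out : List (String × String)) : Decidable (Spec_get_cultivation_constraint chapter_num out) := by unfold Spec_get_cultivation_constraint; infer_instance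

-- ===== CLAIM (what is proved, stated in full; the proofs are below) =====
def Claim_equal_get_cultivation_constraint : Prop := ∀ (chapter_num : Int), Dom_get_cultivation_constraint chapter_num → Spec_get_cultivation_constraint chapter_num (get_cultivation_constraint chapter_num)

-- ===== LEMMAS AND PROOFS =====

-- ===== VERDICT (by name: the statement is the Claim_ definition above) =====
theorem get_cultivation_constraint_spec : Claim_equal_get_cultivation_constraint := by
  intro n _
  unfold Spec_get_cultivation_constraint
  by_cases h : 1 ≤ n ∧ n ≤ 400
  · obtain ⟨h1, h2⟩ := h
    interval_cases n <;> decide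
  · have hA : ∀ L : List ((Int × Int) × (String × String)),
        (∀ p ∈ L, 1 ≤ p.1.1 ∧ p.1.2 ≤ 400) →
        pvFindA L n = [("current_realm", "自由"), ("max_realm", "自由"), ("constraint_text", "")] := by
      intro L hL
      induction L with
      | nil => rfl
      | cons p rest ih =>
        obtain ⟨⟨s, e⟩, c, m⟩ := p
        have hp := hL _ (List.mem_cons_self ..)
        simp only [pvFindA]
        rw [if_neg (by simp only at hp; rintro ⟨h1', h2'⟩; omega)]
        exact ih (fun q hq => hL q (List.mem_cons_of_mem _ hq))
    have hB : get_cultivation_constraint_alt n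
        = [("current_realm", "自由"), ("max_realm", "自由"), ("constraint_text", "")] := by
      rw [get_cultivation_constraint_alt, if_pos (by omega)]
    rw [get_cultivation_constraint, hA pvCMap (by decide), hB]
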